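-- pv_equiv track=rewrite | github.com/dev-kalai-m/compare-sql | src/cmp_sql/parser.py | _consume_through_terminator
-- ===== SOURCE A (Python) =====
-- def _consume_through_terminator(text: str, pos: int) -> int:
--     """Consume text from `pos` through the end of the current statement.
--     Skips balanced parens, string and quoted-identifier literals, and comments;
--     stops at a top-level `;` (inclusive-exclusive — returns index of `;` itself,
--     leaving it for the main loop).
--     """
--     n = len(text)
--     depth = 0
--     while pos < n:
--         c = text[pos]
--         if c in ("'", '"'):
--             pos = _skip_quoted(text, pos, c)
--             continue
--         if c == "-" and pos + 1 < n and text[pos + 1] == "-":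
--             j = text.find("\n", pos)
--             pos = n if j == -1 else j
--             continue
--         if c == "/" and pos + 1 < n and text[pos + 1] == "*":
--             j = text.find("*/", pos + 2)
--             pos = n if j == -1 else j + 2
--             continue
--         if c == "(":
--             depth += 1
--         elif c == ")":
--             if depth == 0:
--                 return pos  # unmatched close — belongs to outer context
--             depth -= 1
--         elif c == ";" and depth == 0:
--             return pos
--         pos += 1
--     return pos
--
-- def _skip_quoted(text: str, pos: int, quote: str) -> int:
--     n = len(text)
--     pos += 1
--     while pos < n:
--         if text[pos] == quote:
--             # Oracle doubles quote to escape.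
--             if pos + 1 < n and text[pos + 1] == quote:
--                 pos += 2
--                 continue
--             return pos + 1
--         pos += 1
--     return pos
-- ===== SOURCE B (Python) =====
-- def _consume_through_terminator(text: str, pos: int) -> int:
--     """Recursive-descent version: parenthesised groups are consumed by a
--     recursive helper instead of a flat depth counter."""
--     n = len(text)
--     while pos < n:
--         c = text[pos]
--         if c == "'" or c == '"':
--             pos = _skip_str(text, pos, c)
--         elif c == "-" and pos + 1 < n and text[pos + 1] == "-":
--             j = text.find("\n", pos)
--             pos = n if j == -1 else j
--         elif c == "/" and pos + 1 < n and text[pos + 1] == "*":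
--             j = text.find("*/", pos + 2)
--             pos = n if j == -1 else j + 2
--         elif c == "(":
--             pos = _skip_group(text, pos + 1)
--         elif c == ")" or c == ";":
--             return pos
--         else:
--             pos += 1
--     return pos
--
--
-- def _skip_group(text: str, pos: int) -> int:
--     """Consume the inside of a parenthesised group (quotes, comments and nested
--     groups included); return the index just past the matching ')' (n if unclosed).
--     A ';' inside a group is an ordinary character."""
--     n = len(text)
--     while pos < n:
--         c = text[pos]
--         if c == "'" or c == '"':
--             pos = _skip_str(text, pos, c)
--         elif c == "-" and pos + 1 < n and text[pos + 1] == "-":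
--             j = text.find("\n", pos)
--             pos = n if j == -1 else j
--         elif c == "/" and pos + 1 < n and text[pos + 1] == "*":
--             j = text.find("*/", pos + 2)
--             pos = n if j == -1 else j + 2
--         elif c == "(":
--             pos = _skip_group(text, pos + 1)
--         elif c == ")":
--             return pos + 1
--         else:
--             pos += 1
--     return pos
--
--
-- def _skip_str(text: str, i: int, quote: str) -> int:
--     """Step past a quoted literal starting at i (doubled quote = escape)."""
--     n = len(text)
--     i += 1
--     while i < n:
--         if text[i] != quote:
--             i += 1
--         elif i + 1 < n and text[i + 1] == quote:
--             i += 2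
--         else:
--             return i + 1
--     return i
-- ===== Notes on version B (the rewrite author's own statement) =====
-- stated objective: alternative
-- what changed: The flat depth counter is replaced by recursive descent: a helper consumes each parenthesised group (recursing on nested '(') and returns the index just past its matching ')', so the top-level scanner never tracks a depth variable and unmatched ')' / ';' fall out naturally at top level.
import Mathlib
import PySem

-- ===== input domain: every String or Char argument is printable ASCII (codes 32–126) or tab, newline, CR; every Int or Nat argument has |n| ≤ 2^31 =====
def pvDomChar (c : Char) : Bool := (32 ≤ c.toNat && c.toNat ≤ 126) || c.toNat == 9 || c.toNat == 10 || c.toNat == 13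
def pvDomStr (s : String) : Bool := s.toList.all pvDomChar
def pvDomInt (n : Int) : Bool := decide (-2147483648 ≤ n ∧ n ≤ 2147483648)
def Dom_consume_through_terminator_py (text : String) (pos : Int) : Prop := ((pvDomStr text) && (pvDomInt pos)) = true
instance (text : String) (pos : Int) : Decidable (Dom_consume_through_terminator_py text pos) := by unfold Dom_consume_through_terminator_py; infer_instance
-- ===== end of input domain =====

-- B replaces A's flat depth counter by recursive descent: a helper consumes one
-- parenthesised group per recursive call (objective: alternative decomposition, same cost).
-- Equivalence is about the return value only; neither program mutates its arguments.

-- Shared termination lemmas (cited by the ports' decreasing_by / bound proofs):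
theorem pvFindFrom_lb (s sub : List Char) (st : Int) (h : PySem.Chars.findFrom s sub st none ≠ -1) :
    0 ≤ PySem.Chars.findFrom s sub st none ∧ st ≤ PySem.Chars.findFrom s sub st none := by
  simp only [PySem.Chars.findFrom] at h ⊢
  split_ifs at h ⊢ <;> try (constructor <;> omega)
  all_goals (first
    | (have := PySem.Chars.neg_one_le_find (List.drop (st + (s.length:Int)).toNat (List.take ((s.length:Int)).toNat s)) sub; constructor <;> omega)
    | (have := PySem.Chars.neg_one_le_find (List.drop (0:Int).toNat (List.take ((s.length:Int)).toNat s)) sub; constructor <;> omega)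
    | (have := PySem.Chars.neg_one_le_find (List.drop st.toNat (List.take ((s.length:Int)).toNat s)) sub; constructor <;> omega))

theorem pvNlJump_gt (cs : List Char) (p : Int) (hp : p < (cs.length : Int))
    (hc : PySem.List.pyGetD cs p ' ' ≠ '\n') :
    p < (if PySem.Chars.findFrom cs ['\n'] p none = -1 then (cs.length : Int)
         else PySem.Chars.findFrom cs ['\n'] p none) := by
  split_ifs with h
  · omega
  · rcases pvFindFrom_lb cs ['\n'] p h with ⟨h0, hge⟩
    rcases lt_or_ge p 0 with hneg | hpos
    · omega
    · have hk : p.toNat ≤ cs.length := by omega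
      have hcast : (p.toNat : Int) = p := by omega
      have hne : PySem.Chars.findFrom cs ['\n'] (p.toNat : Int) none ≠ -1 := by rw [hcast]; exact h
      obtain ⟨h1, h2, h3⟩ := PySem.Chars.findFrom_natCast_spec cs ['\n'] p.toNat hk hne
      rw [hcast] at h1 h2 h3
      rcases eq_or_lt_of_le hge with heq | hlt
      · exfalso
        rw [← heq] at h2
        obtain ⟨t, ht⟩ := h2
        have hget : cs[p.toNat]? = some '\n' := by
          have h5 : (List.drop p.toNat cs)[0]? = cs[p.toNat + 0]? := List.getElem?_drop
          rw [← ht] at h5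
          simpa using h5.symm
        have : PySem.List.pyGetD cs p ' ' = '\n' := by
          rw [PySem.List.pyGetD_of_nonneg cs ' ' hpos]
          simp [List.getD, hget]
        exact hc this
      · exact hlt

theorem pvBcJump_gt (cs : List Char) (p : Int) (hp : p < (cs.length : Int)) :
    p < (if PySem.Chars.findFrom cs ['*', '/'] (p + 2) none = -1 then (cs.length : Int)
         else PySem.Chars.findFrom cs ['*', '/'] (p + 2) none + 2) := by
  split_ifs with h
  · omega
  · rcases pvFindFrom_lb cs ['*', '/'] (p + 2) h with ⟨h0, hge⟩; omega

-- small, named proof steps (kept tiny so they can be cited inside the ports)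
theorem pvM1 {L p : Int} (h : p < L) : (L - (p + 1)).toNat < (L - p).toNat := by omega
theorem pvM2 {L p : Int} (h : p < L) : (L - (p + 2)).toNat < (L - p).toNat := by omega
theorem pvMlt {L p j : Int} (h : p < L) (h2 : p < j) : (L - j).toNat < (L - p).toNat := by omega
theorem pvMlt1 {L p j : Int} (h : p < L) (h2 : p + 1 ≤ j) : (L - j).toNat < (L - p).toNat := by omega
theorem pvLeTrans2 {p j i : Int} (h1 : p < j) (h2 : j ≤ i) : p ≤ i := le_of_lt (lt_of_lt_of_le h1 h2)
theorem pvLeTrans3 {p j i : Int} (h1 : p + 1 ≤ j) (h2 : j ≤ i) : p ≤ i := le_of_lt (lt_of_lt_of_le (lt_of_lt_of_le (lt_add_one p) h1) h2)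
theorem pvLeSucc (p : Int) : p ≤ p + 1 := le_of_lt (lt_add_one p)
theorem pvDashNe {c : Char} (h : c = '-') : c ≠ '\n' := by rw [h]; decide

-- ===== PORT A =====
-- the `while` loop of _skip_quoted (entered after `pos += 1`)
def skipQuotedA (cs : List Char) (q : Char) (p : Int) : Int :=
  if _h : p < (cs.length : Int) then
    if PySem.List.pyGetD cs p ' ' = q then
      if p + 1 < (cs.length : Int) ∧ PySem.List.pyGetD cs (p + 1) ' ' = q then
        skipQuotedA cs q (p + 2)
      else p + 1
    else skipQuotedA cs q (p + 1)
  else p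
termination_by ((cs.length : Int) - p).toNat
decreasing_by
  · exact pvM2 _h
  · exact pvM1 _h

def skip_quoted_py (cs : List Char) (p : Int) (q : Char) : Int := skipQuotedA cs q (p + 1)

theorem skipQuotedA_ge (cs : List Char) (q : Char) (p : Int) : p ≤ skipQuotedA cs q p := by
  fun_induction skipQuotedA cs q p <;> omega

theorem skip_quoted_py_gt (cs : List Char) (p : Int) (q : Char) : p < skip_quoted_py cs p q := by
  have := skipQuotedA_ge cs q (p + 1); unfold skip_quoted_py; omega

-- the main `while` loop of _consume_through_terminator, state (pos, depth)
def loopA (cs : List Char) (p : Int) (d : Int) : Int :=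
  if hlt : p < (cs.length : Int) then
    if hq : PySem.List.pyGetD cs p ' ' = '\'' ∨ PySem.List.pyGetD cs p ' ' = '"' then
      loopA cs (skip_quoted_py cs p (PySem.List.pyGetD cs p ' ')) d
    else if hnl : PySem.List.pyGetD cs p ' ' = '-' ∧ p + 1 < (cs.length : Int) ∧ PySem.List.pyGetD cs (p + 1) ' ' = '-' then
      loopA cs (if PySem.Chars.findFrom cs ['\n'] p none = -1 then (cs.length : Int)
                else PySem.Chars.findFrom cs ['\n'] p none) d
    else if hbc : PySem.List.pyGetD cs p ' ' = '/' ∧ p + 1 < (cs.length : Int) ∧ PySem.List.pyGetD cs (p + 1) ' ' = '*' then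
      loopA cs (if PySem.Chars.findFrom cs ['*', '/'] (p + 2) none = -1 then (cs.length : Int)
                else PySem.Chars.findFrom cs ['*', '/'] (p + 2) none + 2) d
    else if PySem.List.pyGetD cs p ' ' = '(' then loopA cs (p + 1) (d + 1)
    else if PySem.List.pyGetD cs p ' ' = ')' then
      if d = 0 then p else loopA cs (p + 1) (d - 1)
    else if PySem.List.pyGetD cs p ' ' = ';' ∧ d = 0 then p
    else loopA cs (p + 1) d
  else p
termination_by ((cs.length : Int) - p).toNat
decreasing_by
  · exact pvMlt hlt (skip_quoted_py_gt cs p (PySem.List.pyGetD cs p ' '))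
  · exact pvMlt hlt (pvNlJump_gt cs p hlt (pvDashNe hnl.1))
  · exact pvMlt hlt (pvBcJump_gt cs p hlt)
  · exact pvM1 hlt
  · exact pvM1 hlt
  · exact pvM1 hlt

def consume_through_terminator_py (text : String) (pos : Int) : Int :=
  loopA text.toList pos 0

-- ===== PORT B =====
-- B's _skip_str loop (negated-comparison shape)
def skipQuotedB (cs : List Char) (q : Char) (p : Int) : Int :=
  if _h : p < (cs.length : Int) then
    if PySem.List.pyGetD cs p ' ' ≠ q then skipQuotedB cs q (p + 1)
    else if p + 1 < (cs.length : Int) ∧ PySem.List.pyGetD cs (p + 1) ' ' = q then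
      skipQuotedB cs q (p + 2)
    else p + 1
  else p
termination_by ((cs.length : Int) - p).toNat
decreasing_by
  · exact pvM1 _h
  · exact pvM2 _h

def skip_str_alt (cs : List Char) (p : Int) (q : Char) : Int := skipQuotedB cs q (p + 1)

theorem skipQuotedB_ge (cs : List Char) (q : Char) (p : Int) : p ≤ skipQuotedB cs q p := by
  fun_induction skipQuotedB cs q p <;> omega

theorem skip_str_alt_gt (cs : List Char) (p : Int) (q : Char) : p < skip_str_alt cs p q := by
  have := skipQuotedB_ge cs q (p + 1); unfold skip_str_alt; omega

-- _skip_group: consume the inside of a parenthesised group, return index past ')' —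
-- the returned index carries its lower bound (needed for termination of the nested call)
def grpB (cs : List Char) (p : Int) : { j : Int // p ≤ j } :=
  if hlt : p < (cs.length : Int) then
    if hq : PySem.List.pyGetD cs p ' ' = '\'' ∨ PySem.List.pyGetD cs p ' ' = '"' then
      have hj := skip_str_alt_gt cs p (PySem.List.pyGetD cs p ' ')
      let r := grpB cs (skip_str_alt cs p (PySem.List.pyGetD cs p ' '))
      ⟨r.1, pvLeTrans2 hj r.2⟩
    else if hnl : PySem.List.pyGetD cs p ' ' = '-' ∧ p + 1 < (cs.length : Int) ∧ PySem.List.pyGetD cs (p + 1) ' ' = '-' then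
      have hj := pvNlJump_gt cs p hlt (pvDashNe hnl.1)
      let r := grpB cs (if PySem.Chars.findFrom cs ['\n'] p none = -1 then (cs.length : Int)
                        else PySem.Chars.findFrom cs ['\n'] p none)
      ⟨r.1, pvLeTrans2 hj r.2⟩
    else if hbc : PySem.List.pyGetD cs p ' ' = '/' ∧ p + 1 < (cs.length : Int) ∧ PySem.List.pyGetD cs (p + 1) ' ' = '*' then
      have hj := pvBcJump_gt cs p hlt
      let r := grpB cs (if PySem.Chars.findFrom cs ['*', '/'] (p + 2) none = -1 then (cs.length : Int)
                        else PySem.Chars.findFrom cs ['*', '/'] (p + 2) none + 2)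
      ⟨r.1, pvLeTrans2 hj r.2⟩
    else if hop : PySem.List.pyGetD cs p ' ' = '(' then
      match grpB cs (p + 1) with
      | ⟨j, hj2⟩ =>
        let b := grpB cs j
        ⟨b.1, pvLeTrans3 hj2 b.2⟩
    else if PySem.List.pyGetD cs p ' ' = ')' then ⟨p + 1, pvLeSucc p⟩
    else
      let r := grpB cs (p + 1)
      ⟨r.1, pvLeTrans3 (le_refl (p + 1)) r.2⟩
  else ⟨p, le_refl p⟩
termination_by ((cs.length : Int) - p).toNat
decreasing_by
  · exact pvMlt hlt hj
  · exact pvMlt hlt hj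
  · exact pvMlt hlt hj
  · exact pvM1 hlt
  · exact pvMlt1 hlt hj2
  · exact pvM1 hlt

-- top level of B's _consume_through_terminator
def topB (cs : List Char) (p : Int) : Int :=
  if hlt : p < (cs.length : Int) then
    if hq : PySem.List.pyGetD cs p ' ' = '\'' ∨ PySem.List.pyGetD cs p ' ' = '"' then
      have hj := skip_str_alt_gt cs p (PySem.List.pyGetD cs p ' ')
      topB cs (skip_str_alt cs p (PySem.List.pyGetD cs p ' '))
    else if hnl : PySem.List.pyGetD cs p ' ' = '-' ∧ p + 1 < (cs.length : Int) ∧ PySem.List.pyGetD cs (p + 1) ' ' = '-' then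
      have hj := pvNlJump_gt cs p hlt (pvDashNe hnl.1)
      topB cs (if PySem.Chars.findFrom cs ['\n'] p none = -1 then (cs.length : Int)
               else PySem.Chars.findFrom cs ['\n'] p none)
    else if hbc : PySem.List.pyGetD cs p ' ' = '/' ∧ p + 1 < (cs.length : Int) ∧ PySem.List.pyGetD cs (p + 1) ' ' = '*' then
      have hj := pvBcJump_gt cs p hlt
      topB cs (if PySem.Chars.findFrom cs ['*', '/'] (p + 2) none = -1 then (cs.length : Int)
               else PySem.Chars.findFrom cs ['*', '/'] (p + 2) none + 2)
    else if PySem.List.pyGetD cs p ' ' = '(' then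
      match grpB cs (p + 1) with
      | ⟨j, hj2⟩ => topB cs j
    else if PySem.List.pyGetD cs p ' ' = ')' ∨ PySem.List.pyGetD cs p ' ' = ';' then p
    else topB cs (p + 1)
  else p
termination_by ((cs.length : Int) - p).toNat
decreasing_by
  · exact pvMlt hlt hj
  · exact pvMlt hlt hj
  · exact pvMlt hlt hj
  · exact pvMlt1 hlt hj2
  · exact pvM1 hlt

def consume_through_terminator_py_alt (text : String) (pos : Int) : Int :=
  topB text.toList pos

-- ===== PRECONDITION & SPEC =====
-- Pre_ excludes exactly the inputs pos < -len(text), on which A (text[pos]) raises IndexError.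
def Pre_consume_through_terminator_py (text : String) (pos : Int) : Prop :=
  -(text.toList.length : Int) ≤ pos
instance (text : String) (pos : Int) : Decidable (Pre_consume_through_terminator_py text pos) := by unfold Pre_consume_through_terminator_py; infer_instance

def pvWitness_consume_through_terminator_py : String × Int := ("select f(a, b); drop", 0)

def Spec_consume_through_terminator_py (text : String) (pos : Int) (out : Int) : Prop := out = consume_through_terminator_py_alt text pos
instance (text : String) (pos : Int) (out : Int) : Decidable (Spec_consume_through_terminator_py text pos out) := by unfold Spec_consume_through_terminator_py; infer_instance

-- ===== CLAIM (what is proved, stated in full; the proofs are below) =====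
def Claim_equal_consume_through_terminator_py : Prop := ∀ (text : String) (pos : Int), Dom_consume_through_terminator_py text pos → Pre_consume_through_terminator_py text pos → Spec_consume_through_terminator_py text pos (consume_through_terminator_py text pos)

-- ===== LEMMAS AND PROOFS =====

-- the two quote-skipping loops agree
theorem skipQ_eq (cs : List Char) (q : Char) (p : Int) :
    skipQuotedA cs q p = skipQuotedB cs q p := by
  fun_induction skipQuotedA cs q p with
  | case1 p h hc hdbl ih => rw [skipQuotedB]; simp [h, hc, hdbl]; exact ih
  | case2 p h hc hdbl => rw [skipQuotedB]; simp [h, hc, hdbl]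
  | case3 p h hc ih => rw [skipQuotedB]; simp [h, hc]; exact ih
  | case4 p h => rw [skipQuotedB]; simp [h]

theorem skip_eq (cs : List Char) (p : Int) (q : Char) :
    skip_quoted_py cs p q = skip_str_alt cs p q := by
  unfold skip_quoted_py skip_str_alt; exact skipQ_eq cs q (p + 1)

-- A's loop at depth d+1 = A's loop at depth d resumed past the group B consumes
theorem grp_eq (cs : List Char) :
    ∀ k p d, ((cs.length : Int) - p).toNat ≤ k → 0 ≤ d →
      loopA cs p (d + 1) = loopA cs (grpB cs p).1 d := by
  intro k
  induction k with
  | zero =>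
    intro p d hk hd
    have hge : ¬ p < (cs.length : Int) := by omega
    rw [loopA, grpB, dif_neg hge, dif_neg hge, loopA, dif_neg hge]
  | succ k ih =>
    intro p d hk hd
    by_cases hlt : p < (cs.length : Int)
    · rw [loopA, grpB, dif_pos hlt, dif_pos hlt]
      by_cases hq : PySem.List.pyGetD cs p ' ' = '\'' ∨ PySem.List.pyGetD cs p ' ' = '"'
      · rw [dif_pos hq, dif_pos hq, skip_eq]
        have h1 := skip_str_alt_gt cs p (PySem.List.pyGetD cs p ' ')
        exact ih _ d (by omega) hd
      · rw [dif_neg hq, dif_neg hq]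
        by_cases hnl : PySem.List.pyGetD cs p ' ' = '-' ∧ p + 1 < (cs.length : Int) ∧ PySem.List.pyGetD cs (p + 1) ' ' = '-'
        · rw [dif_pos hnl, dif_pos hnl]
          have h1 := pvNlJump_gt cs p hlt (by rw [hnl.1]; decide)
          exact ih _ d (by split_ifs at h1 ⊢ <;> omega) hd
        · rw [dif_neg hnl, dif_neg hnl]
          by_cases hbc : PySem.List.pyGetD cs p ' ' = '/' ∧ p + 1 < (cs.length : Int) ∧ PySem.List.pyGetD cs (p + 1) ' ' = '*'
          · rw [dif_pos hbc, dif_pos hbc]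
            have h1 := pvBcJump_gt cs p hlt
            exact ih _ d (by split_ifs at h1 ⊢ <;> omega) hd
          · rw [dif_neg hbc, dif_neg hbc]
            by_cases hop : PySem.List.pyGetD cs p ' ' = '('
            · rw [if_pos hop, dif_pos hop]
              have e1 := ih (p + 1) (d + 1) (by omega) (by omega)
              rw [e1]
              rcases hgg : grpB cs (p + 1) with ⟨j, hj2⟩
              exact ih j d (by omega) hd
            · rw [if_neg hop, dif_neg hop]
              by_cases hcl : PySem.List.pyGetD cs p ' ' = ')'
              · rw [if_pos hcl, if_pos hcl, if_neg (by omega : ¬ d + 1 = 0)]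
                have : d + 1 - 1 = d := by omega
                rw [this]
              · rw [if_neg hcl, if_neg hcl,
                   if_neg (fun h => by have := h.2; omega)]
                exact ih (p + 1) d (by omega) hd
    · have hge := hlt
      rw [loopA, grpB, dif_neg hge, dif_neg hge, loopA, dif_neg hge]

-- A's loop at depth 0 = B's top-level scan
theorem top_eq (cs : List Char) :
    ∀ k p, ((cs.length : Int) - p).toNat ≤ k → loopA cs p 0 = topB cs p := by
  intro k
  induction k with
  | zero =>
    intro p hk
    have hge : ¬ p < (cs.length : Int) := by omega
    rw [loopA, topB, dif_neg hge, dif_neg hge]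
  | succ k ih =>
    intro p hk
    by_cases hlt : p < (cs.length : Int)
    · rw [loopA, topB, dif_pos hlt, dif_pos hlt]
      by_cases hq : PySem.List.pyGetD cs p ' ' = '\'' ∨ PySem.List.pyGetD cs p ' ' = '"'
      · rw [dif_pos hq, dif_pos hq, skip_eq]
        have h1 := skip_str_alt_gt cs p (PySem.List.pyGetD cs p ' ')
        exact ih _ (by omega)
      · rw [dif_neg hq, dif_neg hq]
        by_cases hnl : PySem.List.pyGetD cs p ' ' = '-' ∧ p + 1 < (cs.length : Int) ∧ PySem.List.pyGetD cs (p + 1) ' ' = '-'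
        · rw [dif_pos hnl, dif_pos hnl]
          have h1 := pvNlJump_gt cs p hlt (by rw [hnl.1]; decide)
          exact ih _ (by split_ifs at h1 ⊢ <;> omega)
        · rw [dif_neg hnl, dif_neg hnl]
          by_cases hbc : PySem.List.pyGetD cs p ' ' = '/' ∧ p + 1 < (cs.length : Int) ∧ PySem.List.pyGetD cs (p + 1) ' ' = '*'
          · rw [dif_pos hbc, dif_pos hbc]
            have h1 := pvBcJump_gt cs p hlt
            exact ih _ (by split_ifs at h1 ⊢ <;> omega)
          · rw [dif_neg hbc, dif_neg hbc]
            by_cases hop : PySem.List.pyGetD cs p ' ' = '('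
            · rw [if_pos hop, if_pos hop]
              have e1 := grp_eq cs k (p + 1) 0 (by omega) (le_refl 0)
              rw [e1]
              rcases hgg : grpB cs (p + 1) with ⟨j, hj2⟩
              exact ih j (by omega)
            · rw [if_neg hop, if_neg hop]
              by_cases hcl : PySem.List.pyGetD cs p ' ' = ')'
              · rw [if_pos hcl, if_pos (Or.inl hcl), if_pos rfl]
              · by_cases hsc : PySem.List.pyGetD cs p ' ' = ';'
                · rw [if_neg hcl, if_pos (Or.inr hsc), if_pos ⟨hsc, rfl⟩]
                · have hor : ¬(PySem.List.pyGetD cs p ' ' = ')' ∨ PySem.List.pyGetD cs p ' ' = ';') := fun h => h.elim hcl hsc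
                  have hand : ¬(PySem.List.pyGetD cs p ' ' = ';' ∧ (0:Int) = 0) := fun h => hsc h.1
                  rw [if_neg hcl, if_neg hand, if_neg hor]
                  exact ih (p + 1) (by omega)
    · have hge := hlt
      rw [loopA, topB, dif_neg hge, dif_neg hge]

-- ===== VERDICT (by name: the statement is the Claim_ definition above) =====
theorem consume_through_terminator_py_spec : Claim_equal_consume_through_terminator_py := by
  intro text pos _ _
  unfold Spec_consume_through_terminator_py consume_through_terminator_py consume_through_terminator_py_alt
  exact top_eq text.toList ((text.toList.length : Int) - pos).toNat pos (le_refl _)
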